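-- pv_equiv track=rewrite | github.com/mortyc126-debug/SHA-256 | exp16B_carry_coupling.py | carry_vector
-- ===== SOURCE A (Python) =====
-- def carry_vector(a, b, n=32):
--     """Compute carry vector for a+b."""
--     carries = []
--     c = 0
--     for i in range(n):
--         ai = (a >> i) & 1
--         bi = (b >> i) & 1
--         s = ai + bi + c
--         c = 1 if s >= 2 else 0
--         carries.append(c)
--     return carries
-- ===== SOURCE B (Python) =====
-- def carry_vector(a, b, n=32):
--     """Compute carry vector for a+b (closed form from the precomputed sum)."""
--     s = a + b
--     return [((s >> (i + 1)) + (a >> (i + 1)) + (b >> (i + 1))) & 1 for i in range(n)]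
-- ===== Notes on version B (the rewrite author's own statement) =====
-- stated objective: alternative
-- what changed: Replaces the serial loop-carried full-adder carry propagation with a closed-form per-bit extraction from the precomputed sum s=a+b (carry into bit i+1 = (s>>(i+1) + a>>(i+1) + b>>(i+1)) mod 2), so iterations are independent.
import Mathlib
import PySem

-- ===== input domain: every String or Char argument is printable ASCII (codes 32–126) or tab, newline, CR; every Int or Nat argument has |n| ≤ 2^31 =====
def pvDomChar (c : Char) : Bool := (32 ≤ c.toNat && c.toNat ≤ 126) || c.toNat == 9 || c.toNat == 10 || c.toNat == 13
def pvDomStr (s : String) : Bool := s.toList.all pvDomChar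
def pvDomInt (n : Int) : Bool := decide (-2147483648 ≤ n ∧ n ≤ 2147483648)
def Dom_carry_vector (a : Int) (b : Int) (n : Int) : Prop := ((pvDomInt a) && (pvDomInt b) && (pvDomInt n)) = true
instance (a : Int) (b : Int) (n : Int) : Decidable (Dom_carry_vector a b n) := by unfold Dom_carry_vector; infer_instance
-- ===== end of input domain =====

-- B replaces A's serial loop-carried carry propagation by a closed-form per-bit extraction
-- from the precomputed sum a+b (objective: alternative algorithm, independent iterations).


-- ===== PORT A =====
-- Python's (x >> i) & 1 is ported as PySem.Int.mod (x >>> i.toNat) 2: Int's >>> floors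
-- (also on negatives) exactly like Python's >>, and x & 1 = x mod 2 in two's complement;
-- i ranges over pyRange 0 n 1, so i ≥ 0 and i.toNat is exact.
def carry_vector (a : Int) (b : Int) (n : Int) : List Int :=
  ((PySem.List.pyRange 0 n 1).foldl
    (fun (st : List Int × Int) (i : Int) =>
      let ai := PySem.Int.mod (a >>> i.toNat) 2
      let bi := PySem.Int.mod (b >>> i.toNat) 2
      let s := ai + bi + st.2
      let c : Int := if s ≥ 2 then 1 else 0
      (st.1 ++ [c], c))
    ([], 0)).1

-- ===== PORT B =====
-- same >> and & 1 convention as above; Python's i+1 (i ≥ 0) is i.toNat + 1.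
def carry_vector_alt (a : Int) (b : Int) (n : Int) : List Int :=
  let s := a + b
  (PySem.List.pyRange 0 n 1).map (fun i =>
    PySem.Int.mod ((s >>> (i.toNat + 1 : Nat)) + (a >>> (i.toNat + 1 : Nat)) + (b >>> (i.toNat + 1 : Nat))) 2)

-- ===== PRECONDITION & SPEC =====
def Spec_carry_vector (a : Int) (b : Int) (n : Int) (out : List Int) : Prop := out = carry_vector_alt a b n
instance (a : Int) (b : Int) (n : Int) (out : List Int) : Decidable (Spec_carry_vector a b n out) := by unfold Spec_carry_vector; infer_instance

-- ===== CLAIM (what is proved, stated in full; the proofs are below) =====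
def Claim_equal_carry_vector : Prop := ∀ (a : Int) (b : Int) (n : Int), Dom_carry_vector a b n → Spec_carry_vector a b n (carry_vector a b n)

-- ===== LEMMAS AND PROOFS =====

-- the exact carry into bit position k of a + b
def pvCarryAt (a b : Int) (k : Nat) : Int := (a + b) / 2 ^ k - a / 2 ^ k - b / 2 ^ k

theorem pvDivSucc (x : Int) (k : Nat) : x / 2 ^ (k + 1) = x / 2 ^ k / 2 := by
  rw [pow_succ, ← Int.ediv_ediv_of_nonneg (show (0:Int) ≤ 2 ^ k by positivity)]

theorem pvCarryAt_zero (a b : Int) : pvCarryAt a b 0 = 0 := by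
  simp [pvCarryAt]

theorem pvCarryAt_bound (a b : Int) (k : Nat) : 0 ≤ pvCarryAt a b k ∧ pvCarryAt a b k ≤ 1 := by
  induction k with
  | zero => simp [pvCarryAt]
  | succ k ih =>
    unfold pvCarryAt at *
    rw [pvDivSucc, pvDivSucc, pvDivSucc]
    generalize hA : a / 2 ^ k = A at *
    generalize hB : b / 2 ^ k = B at *
    generalize hS : (a + b) / 2 ^ k = S at *
    omega

theorem pvCarryAt_step (a b : Int) (k : Nat) :
    (if PySem.Int.mod (a / 2 ^ k) 2 + PySem.Int.mod (b / 2 ^ k) 2 + pvCarryAt a b k ≥ 2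
     then (1 : Int) else 0) = pvCarryAt a b (k + 1) := by
  have hb : (0:Int) < 2 := by norm_num
  have hc := pvCarryAt_bound a b k
  rw [PySem.Int.mod_eq_emod_of_pos hb, PySem.Int.mod_eq_emod_of_pos hb]
  unfold pvCarryAt at hc ⊢
  rw [pvDivSucc, pvDivSucc, pvDivSucc]
  generalize a / 2 ^ k = A at *
  generalize b / 2 ^ k = B at *
  generalize (a + b) / 2 ^ k = S at *
  split_ifs with h <;> omega

theorem pvElem_eq (a b : Int) (k : Nat) :
    PySem.Int.mod ((a + b) >>> (k + 1) + a >>> (k + 1) + b >>> (k + 1)) 2 = pvCarryAt a b (k + 1) := by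
  have hbd := pvCarryAt_bound a b (k + 1)
  rw [PySem.Int.mod_eq_emod_of_pos (show (0:Int) < 2 by norm_num),
      Int.shiftRight_eq_div_pow, Int.shiftRight_eq_div_pow, Int.shiftRight_eq_div_pow]
  simp only [Nat.cast_pow, Nat.cast_ofNat]
  unfold pvCarryAt at *
  generalize a / 2 ^ (k + 1) = A at *
  generalize b / 2 ^ (k + 1) = B at *
  generalize (a + b) / 2 ^ (k + 1) = S at *
  omega

-- loop invariant for A's fold over [0, …, m-1]
theorem pvFoldA (a b : Int) (m : Nat) :
    (List.map (fun (k : Nat) => (k : Int)) (List.range m)).foldl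
      (fun (st : List Int × Int) (i : Int) =>
        let ai := PySem.Int.mod (a >>> i.toNat) 2
        let bi := PySem.Int.mod (b >>> i.toNat) 2
        let s := ai + bi + st.2
        let c : Int := if s ≥ 2 then 1 else 0
        (st.1 ++ [c], c))
      ([], 0)
    = (List.map (fun (k : Nat) =>
         PySem.Int.mod ((a + b) >>> (k + 1) + a >>> (k + 1) + b >>> (k + 1)) 2) (List.range m),
       pvCarryAt a b m) := by
  induction m with
  | zero => simp [pvCarryAt_zero]
  | succ m ih =>
    rw [List.range_succ, List.map_append, List.map_append, List.foldl_append, ih]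
    simp only [List.map_cons, List.map_nil, List.foldl_cons, List.foldl_nil]
    have ht : ((m : Int)).toNat = m := Int.toNat_natCast m
    rw [ht, Int.shiftRight_eq_div_pow, Int.shiftRight_eq_div_pow]
    simp only [Nat.cast_pow, Nat.cast_ofNat]
    rw [pvCarryAt_step a b m, pvElem_eq a b m]

-- ===== VERDICT (by name: the statement is the Claim_ definition above) =====
theorem carry_vector_spec : Claim_equal_carry_vector := by
  intro a b n _
  show carry_vector a b n = carry_vector_alt a b n
  unfold carry_vector carry_vector_alt
  rw [PySem.List.pyRange_one 0 n]
  simp only [Int.sub_zero, zero_add, List.map_map]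
  rw [pvFoldA a b n.toNat]
  simp [Function.comp, Int.toNat_natCast]
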